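-- pv_equiv track=rewrite | github.com/FastLED/FastLED | ci/compile_pch.py | _tokenize_depfile_deps
-- ===== SOURCE A (Python) =====
-- def _tokenize_depfile_deps(deps_str: str) -> list[str]:
--     r"""Tokenize the dependency portion of a Make-format depfile.
--
--     Handles:
--     - ``\<newline>`` line continuations (removed)
--     - ``\ `` escaped spaces within paths (preserved as literal space)
--     - Regular whitespace as token delimiters
--     """
--     # Remove line continuations first
--     deps_str = deps_str.replace("\\\r\n", " ").replace("\\\n", " ")
--
--     tokens: list[str] = []
--     current: list[str] = []
--     i = 0
--     while i < len(deps_str):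
--         ch = deps_str[i]
--         if ch == "\\" and i + 1 < len(deps_str) and deps_str[i + 1] == " ":
--             # Escaped space — part of the current path token
--             current.append(" ")
--             i += 2
--         elif ch in (" ", "\t", "\n", "\r"):
--             # Unescaped whitespace — token delimiter
--             if current:
--                 tokens.append("".join(current))
--                 current = []
--             i += 1
--         else:
--             current.append(ch)
--             i += 1
--     if current:
--         tokens.append("".join(current))
--     return tokens
-- ===== SOURCE B (Python) =====
-- import re
--
-- _TOKEN_RE = re.compile(r'(?:\\ |[^ \t\n\r])+')
--
-- def _tokenize_depfile_deps(deps_str: str) -> list[str]: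
--     """Tokenize the dependency portion of a Make-format depfile (regex scan)."""
--     # Remove line continuations first
--     deps_str = deps_str.replace("\\\r\n", " ").replace("\\\n", " ")
--     # A token is a maximal run of escaped spaces '\ ' or non-delimiter chars;
--     # the delimiters are exactly ' ', '\t', '\n', '\r'.
--     return [tok.replace("\\ ", " ") for tok in _TOKEN_RE.findall(deps_str)]
-- ===== Notes on version B (the rewrite author's own statement) =====
-- stated objective: idiomatic
-- what changed: Replaced the hand-rolled index-walking state machine with its join-accumulator by a regex scan (re.findall of maximal runs of escaped-space-or-non-delimiter) followed by a per-token unescape mapping each escaped space back to a literal space.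
import Mathlib
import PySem

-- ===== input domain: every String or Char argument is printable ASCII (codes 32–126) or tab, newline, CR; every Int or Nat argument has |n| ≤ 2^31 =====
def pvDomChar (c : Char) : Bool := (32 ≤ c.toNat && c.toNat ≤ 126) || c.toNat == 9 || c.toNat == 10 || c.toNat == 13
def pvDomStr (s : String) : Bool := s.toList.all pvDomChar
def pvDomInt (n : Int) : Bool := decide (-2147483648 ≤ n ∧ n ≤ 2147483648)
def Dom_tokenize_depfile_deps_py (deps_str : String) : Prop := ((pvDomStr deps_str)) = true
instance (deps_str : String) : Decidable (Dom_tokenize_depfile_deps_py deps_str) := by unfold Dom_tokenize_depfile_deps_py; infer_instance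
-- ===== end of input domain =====

-- B replaces A's index-walking state machine by a regex findall plus a per-token unescape (objective: idiomatic).

-- ===== PORT A =====
-- A's while loop over index i, with the `tokens` and `current` accumulators;
-- the char list is consumed from the front, branches in source order.
def pvLoopA : List Char → List String → List Char → List String
  | [], toks, cur => toks ++ (if cur = [] then [] else [String.ofList cur])
  | c :: rest, toks, cur =>
    if c = '\\' ∧ rest.head? = some ' ' then
      pvLoopA rest.tail toks (cur ++ [' '])
    else if c = ' ' ∨ c = '\t' ∨ c = '\n' ∨ c = '\r' then
      pvLoopA rest (if cur = [] then toks else toks ++ [String.ofList cur]) []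
    else
      pvLoopA rest toks (cur ++ [c])
termination_by s _ _ => s.length
decreasing_by all_goals (cases rest <;> simp <;> omega)

def tokenize_depfile_deps_py (deps_str : String) : List String :=
  pvLoopA (PySem.Str.replace (PySem.Str.replace deps_str "\\\r\n" " ") "\\\n" " ").toList [] []

-- ===== PORT B =====
-- hand-port (exact) of tok.replace("\\ ", " "): left-to-right, non-overlapping
def pvUnescape : List Char → List Char
  | '\\' :: ' ' :: rest => ' ' :: pvUnescape rest
  | c :: rest => c :: pvUnescape rest
  | [] => []

-- hand-port (exact on this fixed pattern) of re.findall(r'(?:\\ |[^ \t\n\r])+', s):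
-- pvScanTok takes one maximal token match (the alternative '\\ ' tried before the
-- char class), returning (matched chars, remainder); pvFindall skips non-matching
-- positions (delimiters) and collects the matches in order.
def pvScanTok : List Char → List Char × List Char
  | [] => ([], [])
  | c :: rest =>
    if c = '\\' ∧ rest.head? = some ' ' then
      ('\\' :: ' ' :: (pvScanTok rest.tail).1, (pvScanTok rest.tail).2)
    else if c = ' ' ∨ c = '\t' ∨ c = '\n' ∨ c = '\r' then
      ([], c :: rest)
    else
      (c :: (pvScanTok rest).1, (pvScanTok rest).2)
termination_by s => s.length
decreasing_by all_goals (cases rest <;> simp <;> omega)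

-- bounds on the remainder, needed for pvFindall's termination
theorem pvScanTok_snd_length : ∀ (s : List Char), (pvScanTok s).2.length ≤ s.length := by
  intro s
  induction s using pvScanTok.induct with
  | case1 => simp [pvScanTok]
  | case2 c rest h ih =>
      simp only [pvScanTok, if_pos h]
      cases rest <;> simp_all <;> omega
  | case3 c rest h hd => simp [pvScanTok, h, hd]
  | case4 c rest h hd ih =>
      simp only [pvScanTok, if_neg h, if_neg hd]
      simp at ih ⊢; omega

theorem pvScanTok_snd_lt (c : Char) (rest : List Char)
    (h : ¬(c = ' ' ∨ c = '\t' ∨ c = '\n' ∨ c = '\r')) :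
    (pvScanTok (c :: rest)).2.length < (c :: rest).length := by
  by_cases he : c = '\\' ∧ rest.head? = some ' '
  · simp only [pvScanTok, if_pos he]
    have h1 := pvScanTok_snd_length rest.tail
    have h2 : rest.tail.length ≤ rest.length := by cases rest <;> simp
    simp; omega
  · simp only [pvScanTok, if_neg he, if_neg h]
    have := pvScanTok_snd_length rest
    simp; omega

def pvFindall : List Char → List (List Char)
  | [] => []
  | c :: rest =>
    if c = ' ' ∨ c = '\t' ∨ c = '\n' ∨ c = '\r' then pvFindall rest
    else (pvScanTok (c :: rest)).1 :: pvFindall (pvScanTok (c :: rest)).2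
termination_by s => s.length
decreasing_by
  · simp
  · exact pvScanTok_snd_lt _ _ (by assumption)

def tokenize_depfile_deps_py_alt (deps_str : String) : List String :=
  (pvFindall (PySem.Str.replace (PySem.Str.replace deps_str "\\\r\n" " ") "\\\n" " ").toList).map
    (fun t => String.ofList (pvUnescape t))

-- ===== PRECONDITION & SPEC =====
def Spec_tokenize_depfile_deps_py (deps_str : String) (out : List String) : Prop := out = tokenize_depfile_deps_py_alt deps_str
instance (deps_str : String) (out : List String) : Decidable (Spec_tokenize_depfile_deps_py deps_str out) := by unfold Spec_tokenize_depfile_deps_py; infer_instance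

-- ===== CLAIM (what is proved, stated in full; the proofs are below) =====
def Claim_equal_tokenize_depfile_deps_py : Prop := ∀ (deps_str : String), Dom_tokenize_depfile_deps_py deps_str → Spec_tokenize_depfile_deps_py deps_str (tokenize_depfile_deps_py deps_str)

-- ===== LEMMAS AND PROOFS =====

theorem pvLoopA_toks : ∀ (n : Nat) (s : List Char), s.length ≤ n →
    ∀ toks cur, pvLoopA s toks cur = toks ++ pvLoopA s [] cur := by
  intro n
  induction n with
  | zero =>
      intro s hs toks cur
      have : s = [] := by cases s <;> simp_all
      subst this; simp [pvLoopA]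
  | succ n ih =>
      intro s hs toks cur
      cases s with
      | nil => simp [pvLoopA]
      | cons c rest =>
        simp only [pvLoopA]
        split
        · exact ih rest.tail (by cases rest <;> simp_all <;> omega) toks (cur ++ [' '])
        · split
          · rw [ih rest (by simp at hs; omega) (if cur = [] then toks else toks ++ [String.ofList cur]) [],
                ih rest (by simp at hs; omega) (if cur = [] then [] else [] ++ [String.ofList cur]) []]
            split_ifs <;> simp
          · exact ih rest (by simp at hs; omega) toks (cur ++ [c])

theorem pvScanTok_fst_head (s : List Char) : (pvScanTok s).1.head? ≠ some ' ' := by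
  cases s with
  | nil => simp [pvScanTok]
  | cons c rest =>
    by_cases he : c = '\\' ∧ rest.head? = some ' '
    · simp [pvScanTok, if_pos he]
    · by_cases hd : c = ' ' ∨ c = '\t' ∨ c = '\n' ∨ c = '\r'
      · simp [pvScanTok, if_neg he, if_pos hd]
      · simp [pvScanTok, if_neg he, if_neg hd]
        intro hc
        exact hd (Or.inl hc)

theorem pvScanTok_fst_ne_nil (c : Char) (rest : List Char)
    (h : ¬(c = ' ' ∨ c = '\t' ∨ c = '\n' ∨ c = '\r')) :
    (pvScanTok (c :: rest)).1 ≠ [] := by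
  by_cases he : c = '\\' ∧ rest.head? = some ' '
  · simp [pvScanTok, if_pos he]
  · simp [pvScanTok, if_neg he, if_neg h]

theorem pvUnescape_cons (c : Char) (l : List Char) (h : ¬(c = '\\' ∧ l.head? = some ' ')) :
    pvUnescape (c :: l) = c :: pvUnescape l := by
  cases l with
  | nil => rw [pvUnescape.eq_def]; split <;> simp_all
  | cons d rest =>
    rw [pvUnescape.eq_def]
    split
    · rename_i heq; exfalso; apply h; injection heq with h1 h2; injection h2 with h3 _; exact ⟨h1, by simp [h3]⟩
    · rename_i x xs heq; injection heq with h1 h2; subst h1; subst h2; rfl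
    · rename_i heq; exact absurd heq (by simp)

theorem pvUnescape_ne_nil (l : List Char) (h : l ≠ []) : pvUnescape l ≠ [] := by
  rw [pvUnescape.eq_def]
  split <;> simp_all

theorem pvDelim_not_esc (c : Char) (rest : List Char) (hd : c = ' ' ∨ c = '\t' ∨ c = '\n' ∨ c = '\r') :
    ¬(c = '\\' ∧ rest.head? = some ' ') := by
  rintro ⟨hc, -⟩
  subst hc
  rcases hd with h | h | h | h <;> exact absurd h (by decide)

-- one regex token match corresponds to A's loop consuming up to (and including) the next delimiter
theorem pvLoopA_scan : ∀ (n : Nat) (s : List Char), s.length ≤ n → ∀ cur,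
    pvLoopA s [] cur =
      (if cur ++ pvUnescape (pvScanTok s).1 = [] then []
       else [String.ofList (cur ++ pvUnescape (pvScanTok s).1)]) ++ pvLoopA (pvScanTok s).2 [] [] := by
  intro n
  induction n with
  | zero =>
      intro s hs cur
      have : s = [] := by cases s <;> simp_all
      subst this
      simp [pvLoopA, pvScanTok, pvUnescape]
  | succ n ih =>
      intro s hs cur
      cases s with
      | nil => simp [pvLoopA, pvScanTok, pvUnescape]
      | cons c rest =>
        by_cases he : c = '\\' ∧ rest.head? = some ' '
        · have h1 : pvScanTok (c :: rest) = ('\\' :: ' ' :: (pvScanTok rest.tail).1, (pvScanTok rest.tail).2) := by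
            simp only [pvScanTok, if_pos he]
          have h2 : pvLoopA (c :: rest) [] cur = pvLoopA rest.tail [] (cur ++ [' ']) := by
            simp only [pvLoopA, if_pos he]
          have hu : pvUnescape ('\\' :: ' ' :: (pvScanTok rest.tail).1) = ' ' :: pvUnescape (pvScanTok rest.tail).1 := by
            simp [pvUnescape]
          rw [h1, h2, hu]
          have := ih rest.tail (by cases rest <;> simp_all <;> omega) (cur ++ [' '])
          simpa [List.append_assoc] using this
        · by_cases hd : c = ' ' ∨ c = '\t' ∨ c = '\n' ∨ c = '\r'
          · have h1 : pvScanTok (c :: rest) = ([], c :: rest) := by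
              simp only [pvScanTok, if_neg he, if_pos hd]
            have hL : ∀ cur₀ : List Char, pvLoopA (c :: rest) [] cur₀ =
                (if cur₀ = [] then [] else [String.ofList cur₀]) ++ pvLoopA rest [] [] := by
              intro cur₀
              simp only [pvLoopA, if_neg he, if_pos hd]
              rw [pvLoopA_toks n rest (by simp at hs; omega)]
              split_ifs <;> simp
            rw [h1, hL cur, hL []]
            simp [pvUnescape]
          · have h1 : pvScanTok (c :: rest) = (c :: (pvScanTok rest).1, (pvScanTok rest).2) := by
              simp only [pvScanTok, if_neg he, if_neg hd]
            have h2 : pvLoopA (c :: rest) [] cur = pvLoopA rest [] (cur ++ [c]) := by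
              simp only [pvLoopA, if_neg he, if_neg hd]
            have hhead : ¬((c : Char) = '\\' ∧ ((pvScanTok rest).1).head? = some ' ') := by
              rintro ⟨-, hh⟩
              exact pvScanTok_fst_head rest hh
            rw [h1, h2, pvUnescape_cons c _ hhead]
            have := ih rest (by simp at hs; omega) (cur ++ [c])
            simpa [List.append_assoc] using this

theorem pvMain : ∀ (n : Nat) (s : List Char), s.length ≤ n →
    pvLoopA s [] [] = (pvFindall s).map (fun t => String.ofList (pvUnescape t)) := by
  intro n
  induction n with
  | zero =>
      intro s hs
      have : s = [] := by cases s <;> simp_all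
      subst this; simp [pvLoopA, pvFindall]
  | succ n ih =>
      intro s hs
      cases s with
      | nil => simp [pvLoopA, pvFindall]
      | cons c rest =>
        by_cases hd : c = ' ' ∨ c = '\t' ∨ c = '\n' ∨ c = '\r'
        · rw [pvFindall.eq_def]
          simp only [if_pos hd]
          have h2 : pvLoopA (c :: rest) ([] : List String) ([] : List Char) = pvLoopA rest [] [] := by
            simp [pvLoopA, if_neg (pvDelim_not_esc c rest hd), if_pos hd]
          rw [h2]
          exact ih rest (by simp at hs; omega)
        · rw [pvFindall.eq_def]
          simp only [if_neg hd]
          have hscan := pvLoopA_scan (n + 1) (c :: rest) hs []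
          have hne : pvUnescape (pvScanTok (c :: rest)).1 ≠ [] :=
            pvUnescape_ne_nil _ (pvScanTok_fst_ne_nil c rest hd)
          rw [hscan]
          have hlt := pvScanTok_snd_lt c rest hd
          rw [ih (pvScanTok (c :: rest)).2 (by simp at hlt hs ⊢; omega)]
          simp [hne]

-- ===== VERDICT (by name: the statement is the Claim_ definition above) =====
theorem tokenize_depfile_deps_py_spec : Claim_equal_tokenize_depfile_deps_py := by
  intro s _
  unfold Spec_tokenize_depfile_deps_py tokenize_depfile_deps_py tokenize_depfile_deps_py_alt
  exact pvMain _ _ (Nat.le_refl _)
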